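-- pv_equiv track=rewrite | github.com/MoonSangJin/CodingTest | Programmers/(카카오)비밀지도.py | solution
-- ===== SOURCE A (Python) =====
-- def solution(n, arr1, arr2):
--     answer = []
--     bin1=[]
--     bin2=[]
--     for i in arr1:
--         bin=[]
--         for _ in range(n):
--             bin.append(i%2)
--             i=i//2
--         bin.reverse()
--         bin1.append(bin)
--
--     for i in arr2:
--         bin=[]
--         for _ in range(n):
--             bin.append(i%2)
--             i=i//2
--         bin.reverse()
--         bin2.append(bin)
--
--     for i in range(len(bin1)):
--         temp=[]
--         for j in range(len(bin1[i])):
--             if bin1[i][j]==0 and bin2[i][j]==0: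
--                 temp.append(' ')
--             else:
--                 temp.append('#')
--         answer.append(''.join(temp))
--     return answer
-- ===== SOURCE B (Python) =====
-- def solution(n, arr1, arr2):
--     # One pass: per row, read each bit of the two numbers directly with shifts,
--     # most significant first; no intermediate digit lists, no reverse, no index loop.
--     return [''.join('#' if (a >> j) & 1 or (b >> j) & 1 else ' '
--                     for j in range(n - 1, -1, -1))
--             for a, b in zip(arr1, arr2)]
-- ===== Notes on version B (the rewrite author's own statement) =====
-- stated objective: alternative
-- what changed: A materialises full binary-digit lists for every element of both arrays (repeated %2,//2 with a reverse) and then compares them element-wise in a third nested loop; B is a single pass over zip(arr1, arr2) that reads each bit of the two numbers directly with shifts, most significant first, building each row string in one comprehension (no intermediate lists, reversals or index lookups).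
-- outside the precondition, e.g. on solution(0, [1, 2], [3]): A returns ['', ''], B returns ['']
import Mathlib
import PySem

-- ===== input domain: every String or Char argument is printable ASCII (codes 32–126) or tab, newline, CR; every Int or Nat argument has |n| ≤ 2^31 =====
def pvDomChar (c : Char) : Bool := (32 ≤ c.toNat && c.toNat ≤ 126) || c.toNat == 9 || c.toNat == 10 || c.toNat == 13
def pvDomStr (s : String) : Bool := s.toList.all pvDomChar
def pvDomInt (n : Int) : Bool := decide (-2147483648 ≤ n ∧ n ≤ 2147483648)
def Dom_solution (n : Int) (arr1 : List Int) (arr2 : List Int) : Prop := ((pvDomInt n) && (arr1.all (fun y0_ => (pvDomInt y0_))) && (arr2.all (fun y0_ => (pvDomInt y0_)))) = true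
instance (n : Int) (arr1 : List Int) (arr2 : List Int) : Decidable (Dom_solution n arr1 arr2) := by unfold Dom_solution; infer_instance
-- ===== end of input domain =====

-- B replaces A's per-element binary-digit lists and nested compare loop by one pass
-- over zip(arr1, arr2) reading each bit directly with shifts (objective: alternative).

-- ===== PORT A =====
-- the repeated inner loop 'for _ in range(n): bin.append(i%2); i=i//2' followed by reverse
def pvBitsA (n : Int) (i : Int) : List Int :=
  let st := (PySem.List.pyRange 0 n 1).foldl
    (fun (st : List Int × Int) _ =>
      (st.1 ++ [PySem.Int.mod st.2 2], PySem.Int.floordiv st.2 2)) ([], i)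
  st.1.reverse

def solution (n : Int) (arr1 : List Int) (arr2 : List Int) : List String :=
  let bin1 := arr1.foldl (fun bin1 i => bin1 ++ [pvBitsA n i]) []
  let bin2 := arr2.foldl (fun bin2 i => bin2 ++ [pvBitsA n i]) []
  (PySem.List.pyRange 0 (bin1.length : Int) 1).foldl (fun answer i =>
    let row1 := (PySem.List.pyGet? bin1 i).getD []
    let row2 := (PySem.List.pyGet? bin2 i).getD []
    let temp := (PySem.List.pyRange 0 (row1.length : Int) 1).foldl (fun temp j =>
      if PySem.List.pyGetD row1 j 0 = 0 ∧ PySem.List.pyGetD row2 j 0 = 0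
      then temp ++ [' '] else temp ++ ['#']) []
    answer ++ [String.mk temp]) []

-- ===== PORT B =====
-- every j produced by range(n-1, -1, -1) is ≥ 0, so `.toNat` is exact for Python's `>>`
def solution_alt (n : Int) (arr1 : List Int) (arr2 : List Int) : List String :=
  (arr1.zip arr2).map (fun ab =>
    String.mk ((PySem.List.pyRange (n - 1) (-1) (-1)).map (fun j =>
      if PySem.Int.band (ab.1 >>> j.toNat) 1 ≠ 0 ∨ PySem.Int.band (ab.2 >>> j.toNat) 1 ≠ 0
      then '#' else ' ')))

-- ===== PRECONDITION & SPEC =====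
-- Pre_ excludes inputs with len(arr1) > len(arr2): there A raises IndexError whenever
-- n ≥ 1, and for n ≤ 0 A returns one empty row per arr1 element while B's zip truncates
-- (a defensible corner: rows of width ≤ 0 for map squares that have no second grid).
def Pre_solution (n : Int) (arr1 : List Int) (arr2 : List Int) : Prop :=
  arr1.length ≤ arr2.length
instance (n : Int) (arr1 : List Int) (arr2 : List Int) : Decidable (Pre_solution n arr1 arr2) := by unfold Pre_solution; infer_instance

def pvWitness_solution : Int × List Int × List Int := (2, [9], [30])

def Spec_solution (n : Int) (arr1 : List Int) (arr2 : List Int) (out : List String) : Prop := out = solution_alt n arr1 arr2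
instance (n : Int) (arr1 : List Int) (arr2 : List Int) (out : List String) : Decidable (Spec_solution n arr1 arr2 out) := by unfold Spec_solution; infer_instance

-- ===== CLAIM (what is proved, stated in full; the proofs are below) =====
def Claim_equal_solution : Prop := ∀ (n : Int) (arr1 : List Int) (arr2 : List Int), Dom_solution n arr1 arr2 → Pre_solution n arr1 arr2 → Spec_solution n arr1 arr2 (solution n arr1 arr2)

-- ===== LEMMAS AND PROOFS =====

-- floor-division by 2 is an arithmetic right shift by 1
theorem pv_floordiv_two_shift (i : Int) : PySem.Int.floordiv i 2 = i >>> (1 : Nat) := by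
  rw [PySem.Int.floordiv_eq_ediv_of_pos (by norm_num), Int.shiftRight_eq_div_pow]
  norm_num

theorem pv_shift_succ (i : Int) (k : Nat) : (i >>> (1 : Nat)) >>> k = i >>> (k + 1) := by
  rw [show k + 1 = 1 + k from Nat.add_comm k 1, Int.shiftRight_add]

-- A's bit-extraction loop produces the list of low n bits (LSB first) and i >>> n
theorem pv_bits_fold {α : Type} (l : List α) (acc : List Int) (i : Int) :
    l.foldl (fun (st : List Int × Int) _ =>
      (st.1 ++ [PySem.Int.mod st.2 2], PySem.Int.floordiv st.2 2)) (acc, i)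
    = (acc ++ (List.range l.length).map (fun (k : Nat) => PySem.Int.mod (i >>> k) 2),
       i >>> l.length) := by
  induction l generalizing acc i with
  | nil => simp
  | cons x xs ih =>
    simp only [List.foldl_cons, ih, List.length_cons]
    rw [pv_floordiv_two_shift, List.range_succ_eq_map, List.map_cons, List.map_map]
    simp only [Prod.mk.injEq]
    refine ⟨?_, pv_shift_succ i xs.length⟩
    simp [Function.comp_def, pv_shift_succ]

theorem pv_bitsA_eq (n : Int) (i : Int) :
    pvBitsA n i
      = ((List.range n.toNat).map (fun (k : Nat) => PySem.Int.mod (i >>> k) 2)).reverse := by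
  unfold pvBitsA
  rw [PySem.List.pyRange_one]
  simp only [pv_bits_fold, List.length_map, List.length_range]
  simp

-- append-accumulator fold is map
theorem pv_foldl_append_map {α β : Type} (l : List α) (f : α → β) (acc : List β) :
    l.foldl (fun r x => r ++ [f x]) acc = acc ++ l.map f := by
  induction l generalizing acc with
  | nil => simp
  | cons x xs ih => simp [ih]

-- 'if p then r ++ [c] else r ++ [d]' accumulation is a map
theorem pv_foldl_ite_append {α β : Type} (l : List α) (p : α → Prop) [DecidablePred p]
    (c d : β) (acc : List β) :
    l.foldl (fun r x => if p x then r ++ [c] else r ++ [d]) acc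
      = acc ++ l.map (fun x => if p x then c else d) := by
  induction l generalizing acc with
  | nil => simp
  | cons x xs ih => by_cases h : p x <;> simp [h, ih]

theorem pv_rev_bit (a : Int) (m j : Nat) (hj : j < m) :
    PySem.List.pyGetD ((List.range m).map (fun (k : Nat) => PySem.Int.mod (a >>> k) 2)).reverse
        (j : Int) 0
      = PySem.Int.mod (a >>> (m - 1 - j)) 2 := by
  rw [PySem.List.pyGetD_natCast, List.getD_eq_getElem _ _ (by simp [hj])]
  simp [List.getElem_reverse, hj]

theorem pv_char (x y : Int) (hx : x = 0 ∨ x = 1) (hy : y = 0 ∨ y = 1) :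
    (if x = 0 ∧ y = 0 then ' ' else '#') = (if x ≠ 0 ∨ y ≠ 0 then '#' else ' ') := by
  rcases hx with h | h <;> rcases hy with h' | h' <;> subst h <;> subst h' <;> decide

theorem solution_spec : Claim_equal_solution := by
  intro n arr1 arr2 _ hpre
  unfold Spec_solution solution solution_alt
  unfold Pre_solution at hpre
  simp only [pv_foldl_append_map, pv_foldl_ite_append, List.nil_append, pv_bitsA_eq,
    PySem.List.pyRange_one, PySem.List.pyRange_neg_one, List.map_map]
  apply List.ext_getElem
  · simp [List.length_zip]
    omega
  · intro t ht1 ht2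
    simp only [List.length_map, List.length_range, List.length_zip] at ht1 ht2
    simp only [Function.comp_def, zero_add, sub_zero, Int.toNat_natCast, List.getElem_map,
      List.getElem_range, List.getElem_zip, PySem.List.pyGet?_natCast, List.getElem?_map,
      List.length_map]
    rw [List.getElem?_eq_getElem (by omega), List.getElem?_eq_getElem (by omega)]
    simp only [Option.map_some, Option.getD_some, List.length_reverse, List.length_map,
      List.length_range]
    simp only [show (n - 1 - -1 : Int) = n from by ring]
    refine congrArg _ (List.map_congr_left fun j hj => ?_)
    rw [List.mem_range] at hj
    simp only [pv_rev_bit _ _ _ hj, PySem.Int.band_one,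
      show (n - 1 - (j : Int)).toNat = n.toNat - 1 - j by omega]
    exact pv_char _ _ (PySem.Int.mod_two_eq _) (PySem.Int.mod_two_eq _)
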